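-- pv_equiv track=rewrite | github.com/gikashvili-giorgi/Archiver | archiver_packages/youtube/add_comments.py | format_text_emoji
-- ===== SOURCE A (Python) =====
-- def format_text_emoji(input_text: str) -> str:
--     """
--     Format text with emojis, merging single-character lines with the previous line.
--
--     Args:
--         input_text (str): The input text to format.
--
--     Returns:
--         str: The formatted text.
--     """
--     lines = input_text.split('\n')
--     merged_lines = []
--     for i, line in enumerate(lines):
--         if i > 0 and len(line) == 1:
--             merged_lines[-1] += ' ' + line
--         else:
--             merged_lines.append(line)
--     return '\n'.join(merged_lines)
-- ===== SOURCE B (Python) =====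
-- def format_text_emoji(input_text: str) -> str:
--     """Single left-to-right character scan: a newline that starts a line of
--     exactly one character (peek at the next two characters) is replaced by a
--     space; every other character is copied unchanged."""
--     s = input_text
--     n = len(s)
--     out = []
--     for i, c in enumerate(s):
--         if c == '\n' and i + 1 < n and s[i + 1] != '\n' and (i + 2 == n or s[i + 2] == '\n'):
--             out.append(' ')
--         else:
--             out.append(c)
--     return ''.join(out)
-- ===== Notes on version B (the rewrite author's own statement) =====
-- stated objective: alternative
-- what changed: Instead of splitting into a list of lines and re-joining while mutating the last merged line, B makes one character scan over the raw string, rewriting each newline that precedes a one-character line (detected by a two-character lookahead) into a space.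
import Mathlib
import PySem

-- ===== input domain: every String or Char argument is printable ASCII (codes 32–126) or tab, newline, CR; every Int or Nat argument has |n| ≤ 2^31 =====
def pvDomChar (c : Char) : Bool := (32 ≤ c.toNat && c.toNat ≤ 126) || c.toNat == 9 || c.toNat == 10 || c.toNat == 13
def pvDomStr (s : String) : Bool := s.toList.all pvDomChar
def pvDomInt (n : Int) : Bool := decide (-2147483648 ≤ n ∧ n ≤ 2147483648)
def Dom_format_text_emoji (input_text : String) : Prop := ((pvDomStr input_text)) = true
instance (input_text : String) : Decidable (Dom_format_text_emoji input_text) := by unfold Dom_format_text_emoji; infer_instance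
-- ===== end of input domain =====

-- B replaces A's split-into-lines / merge-into-last-line / re-join pipeline by a single
-- character scan with a two-character lookahead; objective: alternative (same cost).

-- ===== PORT A =====
-- the body of A's `for i, line in enumerate(lines)` loop (merged_lines is the accumulator)
def pvMergeStep (acc : List (List Char)) (p : Int × List Char) : List (List Char) :=
  if p.1 > 0 ∧ p.2.length = 1 then
    acc.dropLast ++ [(acc.getLast?.getD []) ++ (' ' :: p.2)]   -- merged_lines[-1] += ' ' + line (list is never empty here)
  else
    acc ++ [p.2]

def format_text_emoji (input_text : String) : String :=
  String.mk (PySem.Chars.join ['\n']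
    ((PySem.List.enumerate (PySem.Chars.splitOn input_text.toList ['\n']) 0).foldl
      pvMergeStep []))

-- ===== PORT B =====
-- Source B's scan: each character is copied, except a '\n' followed by exactly one
-- non-'\n' character before the next '\n' / end of string, which becomes ' '.
def pvScan : List Char → List Char
  | [] => []
  | [c] => [c]
  | c :: d :: rest =>
    if c = '\n' ∧ d ≠ '\n' ∧ (rest = [] ∨ rest.head? = some '\n') then
      ' ' :: pvScan (d :: rest)
    else
      c :: pvScan (d :: rest)

def format_text_emoji_alt (input_text : String) : String :=
  String.mk (pvScan input_text.toList)

-- ===== PRECONDITION & SPEC =====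
def Spec_format_text_emoji (input_text : String) (out : String) : Prop := out = format_text_emoji_alt input_text
instance (input_text : String) (out : String) : Decidable (Spec_format_text_emoji input_text out) := by unfold Spec_format_text_emoji; infer_instance

-- ===== CLAIM (what is proved, stated in full; the proofs are below) =====
def Claim_equal_format_text_emoji : Prop := ∀ (input_text : String), Dom_format_text_emoji input_text → Spec_format_text_emoji input_text (format_text_emoji input_text)

-- ===== LEMMAS AND PROOFS =====

-- proof-side reference version of Python's s.split('\n') by structural recursion
def pvSplitNL : List Char → List (List Char)
  | [] => [[]]
  | c :: rest => if c = '\n' then [] :: pvSplitNL rest else (pvSplitNL rest).modifyHead (c :: ·)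

theorem pvSplitNL_ne_nil (s : List Char) : pvSplitNL s ≠ [] := by
  cases s with
  | nil => simp [pvSplitNL]
  | cons c rest =>
    simp only [pvSplitNL]
    split
    · simp
    · cases hh : pvSplitNL rest with
      | nil => exact absurd hh (pvSplitNL_ne_nil rest)
      | cons a t => simp [hh]

theorem pvSplitOn_go_eq (fuel : Nat) (l cur : List Char) (acc : List (List Char))
    (hf : l.length < fuel) :
    PySem.Chars.splitOn.go ['\n'] fuel l cur acc
      = acc.reverse ++ (pvSplitNL l).modifyHead (cur.reverse ++ ·) := by
  induction fuel generalizing l cur acc with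
  | zero => omega
  | succ fuel ih =>
    cases l with
    | nil => simp [PySem.Chars.splitOn.go, pvSplitNL]
    | cons c rest =>
      by_cases hc : c = '\n'
      · subst hc
        have hpre : List.isPrefixOf ['\n'] ('\n' :: rest) = true := by
          simp [List.isPrefixOf]
        rw [show PySem.Chars.splitOn.go ['\n'] (fuel + 1) ('\n' :: rest) cur acc
              = PySem.Chars.splitOn.go ['\n'] fuel (List.drop (List.length ['\n']) ('\n' :: rest)) [] (cur.reverse :: acc) by
            simp [PySem.Chars.splitOn.go, hpre]]
        rw [ih _ _ _ (by simpa using Nat.lt_of_succ_lt_succ hf)]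
        obtain ⟨h, t, hht⟩ : ∃ h t, pvSplitNL rest = h :: t := by
          cases hh : pvSplitNL rest with
          | nil => exact absurd hh (pvSplitNL_ne_nil rest)
          | cons a t => exact ⟨a, t, rfl⟩
        simp [pvSplitNL, hht]
      · have hpre : List.isPrefixOf ['\n'] (c :: rest) = false := by
          simp [List.isPrefixOf]
          exact fun h => hc h.symm
        rw [show PySem.Chars.splitOn.go ['\n'] (fuel + 1) (c :: rest) cur acc
              = PySem.Chars.splitOn.go ['\n'] fuel rest (c :: cur) acc by
            simp [PySem.Chars.splitOn.go, hpre]]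
        rw [ih _ _ _ (by simpa using Nat.lt_of_succ_lt_succ hf)]
        obtain ⟨h, t, hht⟩ : ∃ h t, pvSplitNL rest = h :: t := by
          cases hh : pvSplitNL rest with
          | nil => exact absurd hh (pvSplitNL_ne_nil rest)
          | cons a t => exact ⟨a, t, rfl⟩
        simp [pvSplitNL, hc, hht]

theorem pvSplitOn_eq (s : List Char) : PySem.Chars.splitOn s ['\n'] = pvSplitNL s := by
  have := pvSplitOn_go_eq (s.length + 1) s [] [] (by omega)
  obtain ⟨h, t, hht⟩ : ∃ h t, pvSplitNL s = h :: t := by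
    cases hh : pvSplitNL s with
    | nil => exact absurd hh (pvSplitNL_ne_nil s)
    | cons a t => exact ⟨a, t, rfl⟩
  simpa [PySem.Chars.splitOn, hht] using this

-- the separator a merged/kept line contributes in the linear form of A's result
def pvTag (l : List Char) : List Char := (if l.length = 1 then ' ' else '\n') :: l

theorem pvJoin_cons_ne_nil (a : List Char) (L : List (List Char)) (h : L ≠ []) :
    PySem.Chars.join ['\n'] (a :: L) = a ++ ['\n'] ++ PySem.Chars.join ['\n'] L := by
  cases L with
  | nil => exact absurd rfl h
  | cons p rest => exact PySem.Chars.join_cons_cons _ _ _ _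

theorem pvJoin_update_last (acc : List (List Char)) (x : List Char) (h : acc ≠ []) :
    PySem.Chars.join ['\n'] (acc.dropLast ++ [(acc.getLast?.getD []) ++ x])
      = PySem.Chars.join ['\n'] acc ++ x := by
  induction acc with
  | nil => exact absurd rfl h
  | cons a t ih =>
    cases t with
    | nil => simp [PySem.Chars.join_singleton]
    | cons b u =>
      have ih' := ih (by simp)
      have hd : (a :: b :: u).dropLast ++ [(a :: b :: u).getLast?.getD [] ++ x]
          = a :: ((b :: u).dropLast ++ [(b :: u).getLast?.getD [] ++ x]) := by
        simp [List.getLast?_cons_cons]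
      rw [hd, pvJoin_cons_ne_nil _ _ (by simp), ih',
        pvJoin_cons_ne_nil a (b :: u) (by simp)]
      simp

theorem pvJoin_append_last (acc : List (List Char)) (l : List Char) (h : acc ≠ []) :
    PySem.Chars.join ['\n'] (acc ++ [l]) = PySem.Chars.join ['\n'] acc ++ '\n' :: l := by
  induction acc with
  | nil => exact absurd rfl h
  | cons a t ih =>
    cases t with
    | nil =>
      simp [PySem.Chars.join_cons_cons, PySem.Chars.join_singleton]
    | cons b u =>
      have ih' := ih (by simp)
      rw [List.cons_append, pvJoin_cons_ne_nil _ _ (by simp), ih',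
        pvJoin_cons_ne_nil a (b :: u) (by simp)]
      simp

theorem pvFoldA (t : List (List Char)) (k : Int) (acc : List (List Char))
    (hacc : acc ≠ []) (hk : 0 < k) :
    PySem.Chars.join ['\n'] ((PySem.List.enumerate t k).foldl pvMergeStep acc)
      = PySem.Chars.join ['\n'] acc ++ (t.map pvTag).flatten := by
  induction t generalizing k acc with
  | nil => simp [PySem.List.enumerate_nil]
  | cons l rest ih =>
    rw [PySem.List.enumerate_cons]
    simp only [List.foldl_cons]
    by_cases hl : l.length = 1
    · rw [show pvMergeStep acc (k, l)
            = acc.dropLast ++ [(acc.getLast?.getD []) ++ (' ' :: l)] by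
          simp [pvMergeStep, hl, hk]]
      rw [ih _ _ (by simp) (by omega)]
      rw [pvJoin_update_last acc (' ' :: l) hacc]
      simp [pvTag, hl]
    · rw [show pvMergeStep acc (k, l) = acc ++ [l] by simp [pvMergeStep, hl]]
      rw [ih _ _ (by simp) (by omega)]
      rw [pvJoin_append_last acc l hacc]
      simp [pvTag, hl]

-- linear form of A's result
def pvLinear (s : List Char) : List Char :=
  match pvSplitNL s with
  | [] => []
  | h :: t => h ++ (t.map pvTag).flatten

theorem pvA_eq_linear (s : List Char) :
    PySem.Chars.join ['\n']
        ((PySem.List.enumerate (PySem.Chars.splitOn s ['\n']) 0).foldl pvMergeStep [])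
      = pvLinear s := by
  rw [pvSplitOn_eq]
  obtain ⟨h, t, hht⟩ : ∃ h t, pvSplitNL s = h :: t := by
    cases hh : pvSplitNL s with
    | nil => exact absurd hh (pvSplitNL_ne_nil s)
    | cons a t => exact ⟨a, t, rfl⟩
  rw [hht, PySem.List.enumerate_cons]
  simp only [List.foldl_cons]
  rw [show pvMergeStep [] (0, h) = [h] by simp [pvMergeStep]]
  rw [pvFoldA t (0 + 1) [h] (by simp) (by omega)]
  simp [pvLinear, hht, PySem.Chars.join_singleton]

-- the head line of pvSplitNL is empty exactly when s starts with '\n' or is empty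
theorem pvHead_nil_iff (s : List Char) :
    (pvSplitNL s).headD [] = [] ↔ (s = [] ∨ s.head? = some '\n') := by
  cases s with
  | nil => simp [pvSplitNL]
  | cons c rest =>
    by_cases hc : c = '\n'
    · simp [pvSplitNL, hc]
    · obtain ⟨h, t, hht⟩ : ∃ h t, pvSplitNL rest = h :: t := by
        cases hh : pvSplitNL rest with
        | nil => exact absurd hh (pvSplitNL_ne_nil rest)
        | cons a t => exact ⟨a, t, rfl⟩
      simp [pvSplitNL, hc, hht]

theorem pvLinear_cons (c : Char) (s : List Char) :
    pvLinear (c :: s)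
      = if c = '\n' then
          (if ((pvSplitNL s).headD []).length = 1 then ' ' else '\n') :: pvLinear s
        else c :: pvLinear s := by
  obtain ⟨h, t, hht⟩ : ∃ h t, pvSplitNL s = h :: t := by
    cases hh : pvSplitNL s with
    | nil => exact absurd hh (pvSplitNL_ne_nil s)
    | cons a t => exact ⟨a, t, rfl⟩
  by_cases hc : c = '\n'
  · simp [pvLinear, pvSplitNL, hc, hht, pvTag]
  · simp [pvLinear, pvSplitNL, hc, hht]

theorem pvScan_eq_linear (s : List Char) : pvScan s = pvLinear s := by
  induction s with
  | nil => simp [pvScan, pvLinear, pvSplitNL]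
  | cons c s' ih =>
    rw [pvLinear_cons]
    by_cases hc : c = '\n'
    · subst hc
      rw [if_pos rfl]
      cases s' with
      | nil => simp [pvScan, pvSplitNL, pvLinear]
      | cons d rest =>
        by_cases hd : d = '\n'
        · rw [show pvScan ('\n' :: d :: rest) = '\n' :: pvScan (d :: rest) by
              simp [pvScan, hd]]
          rw [ih]
          have : (pvSplitNL (d :: rest)).headD [] = [] := by
            rw [pvHead_nil_iff]; simp [hd]
          simp only [List.headD_eq_head?_getD] at this
          simp [this]
        · by_cases hr : rest = [] ∨ rest.head? = some '\n'
          · rw [show pvScan ('\n' :: d :: rest) = ' ' :: pvScan (d :: rest) by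
                simp [pvScan, hd, hr]]
            rw [ih]
            have h1 : (pvSplitNL rest).headD [] = [] := by rw [pvHead_nil_iff]; exact hr
            have : (pvSplitNL (d :: rest)).headD [] = [d] := by
              obtain ⟨h, t, hht⟩ : ∃ h t, pvSplitNL rest = h :: t := by
                cases hh : pvSplitNL rest with
                | nil => exact absurd hh (pvSplitNL_ne_nil rest)
                | cons a t => exact ⟨a, t, rfl⟩
              rw [hht] at h1; simp at h1
              simp [pvSplitNL, hd, hht, h1]
            simp only [List.headD_eq_head?_getD] at this
            simp [this]
          · rw [show pvScan ('\n' :: d :: rest) = '\n' :: pvScan (d :: rest) by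
                simp [pvScan, hd, hr]]
            rw [ih]
            have h1 : (pvSplitNL rest).headD [] ≠ [] := by
              rw [Ne, pvHead_nil_iff]; exact hr
            have : ((pvSplitNL (d :: rest)).headD []).length ≠ 1 := by
              obtain ⟨h, t, hht⟩ : ∃ h t, pvSplitNL rest = h :: t := by
                cases hh : pvSplitNL rest with
                | nil => exact absurd hh (pvSplitNL_ne_nil rest)
                | cons a t => exact ⟨a, t, rfl⟩
              rw [hht] at h1; simp at h1
              simp [pvSplitNL, hd, hht]
              intro hlen
              exact h1 hlen
            simp only [List.headD_eq_head?_getD] at this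
            simp [this]
    · rw [if_neg hc]
      cases s' with
      | nil => simp [pvScan, pvLinear, pvSplitNL]
      | cons d rest =>
        rw [show pvScan (c :: d :: rest) = c :: pvScan (d :: rest) by
            simp [pvScan, hc]]
        rw [ih]

-- ===== VERDICT (by name: the statement is the Claim_ definition above) =====
theorem format_text_emoji_spec : Claim_equal_format_text_emoji := by
  intro input_text _
  show format_text_emoji input_text = format_text_emoji_alt input_text
  unfold format_text_emoji format_text_emoji_alt
  rw [pvA_eq_linear input_text.toList, pvScan_eq_linear input_text.toList]
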